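-- pv_equiv track=rewrite | github.com/avihay30/PythonProjects | Python_practices/Exam_Practices/recursive_functions.py | multiply_digits_non_divided_by_3_or_5
-- ===== SOURCE A (Python) =====
-- def multiply_digits_non_divided_by_3_or_5(number):
--     # if last digit is not divided by 3 or 5.
--     if not ((number % 10) % 5 == 0 or (number % 10) % 3 == 0):
--         if number > 10:
--             return number % 10 * multiply_digits_non_divided_by_3_or_5(number // 10)
--         return number
--     if number < 10:
--         return 1
--     return multiply_digits_non_divided_by_3_or_5(number // 10)
-- ===== SOURCE B (Python) =====
-- def multiply_digits_non_divided_by_3_or_5(number):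
--     result = 1
--     while number >= 10:
--         d = number % 10
--         if d % 3 != 0 and d % 5 != 0:
--             result *= d
--         number //= 10
--     if (number % 10) % 3 != 0 and (number % 10) % 5 != 0:
--         result *= number
--     return result
-- ===== Notes on version B (the rewrite author's own statement) =====
-- stated objective: simpler
-- what changed: Replaced the recursion with a single iterative while-loop that accumulates the product in an explicit accumulator and applies the keep-or-skip test once to the final remaining value.
import Mathlib
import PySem

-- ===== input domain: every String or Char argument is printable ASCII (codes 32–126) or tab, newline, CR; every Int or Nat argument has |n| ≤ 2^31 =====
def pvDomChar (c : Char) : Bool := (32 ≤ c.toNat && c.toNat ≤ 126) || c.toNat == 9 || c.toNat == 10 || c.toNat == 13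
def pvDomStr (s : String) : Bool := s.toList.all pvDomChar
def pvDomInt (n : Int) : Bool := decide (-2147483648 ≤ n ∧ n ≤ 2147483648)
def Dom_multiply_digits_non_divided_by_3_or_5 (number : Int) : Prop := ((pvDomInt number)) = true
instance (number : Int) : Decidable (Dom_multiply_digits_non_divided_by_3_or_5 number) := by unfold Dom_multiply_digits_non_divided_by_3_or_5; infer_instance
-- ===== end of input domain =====

-- B replaces A's recursion by an iterative loop with an explicit accumulator (objective: simpler).

-- ===== PORT A =====
-- measure for the recursion: both recursive calls happen with number ≥ 10
theorem pvA_dec (number : Int) (h : (10:Int) ≤ number) :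
    (PySem.Int.floordiv number 10).toNat < number.toNat := by
  rw [PySem.Int.floordiv_eq_ediv_of_pos (by omega)]
  omega

def multiply_digits_non_divided_by_3_or_5 (number : Int) : Int :=
  if ¬ (PySem.Int.mod (PySem.Int.mod number 10) 5 = 0 ∨ PySem.Int.mod (PySem.Int.mod number 10) 3 = 0) then
    if number > 10 then
      PySem.Int.mod number 10 * multiply_digits_non_divided_by_3_or_5 (PySem.Int.floordiv number 10)
    else
      number
  else if number < 10 then
    1
  else
    multiply_digits_non_divided_by_3_or_5 (PySem.Int.floordiv number 10)
termination_by number.toNat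
decreasing_by
  · exact pvA_dec number (by omega)
  · exact pvA_dec number (by omega)

-- ===== PORT B =====
-- the while-loop of Source B: state = (number, result)
def pvAltLoop (number : Int) (result : Int) : Int × Int :=
  if number ≥ 10 then
    let d := PySem.Int.mod number 10
    pvAltLoop (PySem.Int.floordiv number 10)
      (if PySem.Int.mod d 3 ≠ 0 ∧ PySem.Int.mod d 5 ≠ 0 then result * d else result)
  else
    (number, result)
termination_by number.toNat
decreasing_by exact pvA_dec number (by omega)

def multiply_digits_non_divided_by_3_or_5_alt (number : Int) : Int :=
  let p := pvAltLoop number 1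
  if PySem.Int.mod (PySem.Int.mod p.1 10) 3 ≠ 0 ∧ PySem.Int.mod (PySem.Int.mod p.1 10) 5 ≠ 0 then
    p.2 * p.1
  else
    p.2

-- ===== PRECONDITION & SPEC =====
def Spec_multiply_digits_non_divided_by_3_or_5 (number : Int) (out : Int) : Prop := out = multiply_digits_non_divided_by_3_or_5_alt number
instance (number : Int) (out : Int) : Decidable (Spec_multiply_digits_non_divided_by_3_or_5 number out) := by unfold Spec_multiply_digits_non_divided_by_3_or_5; infer_instance

-- ===== CLAIM (what is proved, stated in full; the proofs are below) =====
def Claim_equal_multiply_digits_non_divided_by_3_or_5 : Prop := ∀ (number : Int), Dom_multiply_digits_non_divided_by_3_or_5 number → Spec_multiply_digits_non_divided_by_3_or_5 number (multiply_digits_non_divided_by_3_or_5 number)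

-- ===== LEMMAS AND PROOFS =====

-- loop invariant: running the loop from (n, r) and applying the final step yields r * A n
theorem pvAltLoop_eq (number result : Int) :
    (let p := pvAltLoop number result
     if PySem.Int.mod (PySem.Int.mod p.1 10) 3 ≠ 0 ∧ PySem.Int.mod (PySem.Int.mod p.1 10) 5 ≠ 0 then
       p.2 * p.1
     else
       p.2) = result * multiply_digits_non_divided_by_3_or_5 number := by
  by_cases h : number ≥ 10
  · rw [pvAltLoop]
    simp only [if_pos h]
    rw [pvAltLoop_eq (PySem.Int.floordiv number 10)]
    conv_rhs => rw [multiply_digits_non_divided_by_3_or_5]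
    by_cases hk : PySem.Int.mod (PySem.Int.mod number 10) 3 ≠ 0 ∧ PySem.Int.mod (PySem.Int.mod number 10) 5 ≠ 0
    · -- digit kept: A takes the not-divisible branch with number > 10 (so number ≠ 10, since mod 10 10 = 0)
      have h10 : number ≠ 10 := by
        rintro rfl
        simp [PySem.Int.mod] at hk
      rw [if_pos hk, if_pos (by tauto), if_pos (by omega)]
      ring
    · rw [if_neg hk]
      have hdiv : PySem.Int.mod (PySem.Int.mod number 10) 5 = 0 ∨ PySem.Int.mod (PySem.Int.mod number 10) 3 = 0 := by
        tauto
      rw [if_neg (by tauto), if_neg (by omega)]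
  · rw [pvAltLoop]
    simp only [if_neg h]
    conv_rhs => rw [multiply_digits_non_divided_by_3_or_5]
    by_cases hk : PySem.Int.mod (PySem.Int.mod number 10) 3 ≠ 0 ∧ PySem.Int.mod (PySem.Int.mod number 10) 5 ≠ 0
    · rw [if_pos hk, if_pos (by tauto), if_neg (by omega)]
    · rw [if_neg hk, if_neg (by tauto), if_pos (by omega)]
      ring
termination_by number.toNat
decreasing_by exact pvA_dec number (by omega)

-- ===== VERDICT (by name: the statement is the Claim_ definition above) =====
theorem multiply_digits_non_divided_by_3_or_5_spec : Claim_equal_multiply_digits_non_divided_by_3_or_5 := by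
  intro number _
  unfold Spec_multiply_digits_non_divided_by_3_or_5 multiply_digits_non_divided_by_3_or_5_alt
  rw [pvAltLoop_eq]
  ring
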